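-- pv_equiv track=rewrite | github.com/pawelmusski-collab/numerology | numerology/psychomatrix.py | _get_working_numbers
-- ===== SOURCE A (Python) =====
-- def _get_working_numbers(day: int, month: int, year: int) -> list[int]:
--     """Вычисляем рабочие числа для психоматрицы."""
--     dob = f"{day:02d}{month:02d}{year}"
--     first_sum = sum(int(d) for d in dob)
--
--     # Редуцируем до однозначного
--     second_sum = sum(int(d) for d in str(first_sum))
--     if first_sum > 9:
--         second_sum = sum(int(d) for d in str(first_sum))
--     else:
--         second_sum = first_sum
--
--     third_sum = first_sum - 2 * int(str(day)[0]) if day >= 10 else first_sum - 2 * day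
--     fourth_sum = sum(int(d) for d in str(third_sum))
--
--     return [day, month, year, first_sum, second_sum, third_sum, fourth_sum]
-- ===== SOURCE B (Python) =====
-- def _get_working_numbers(day: int, month: int, year: int) -> list[int]:
--     """Working numbers via the truncation identity digit_sum(n) = n - 9*sum(n//10**k, k>=1):
--     one power-of-ten loop per component, which also yields the leading digit directly."""
--     def stats(n: int) -> tuple[int, int]:
--         # t accumulates the truncations n//10, n//100, ...; p ends as the largest
--         # power of ten <= n (or 1), so n//p is the leading digit.
--         t, p = 0, 1
--         while p * 10 <= n:
--             p *= 10
--             t += n // p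
--         return n - 9 * t, (n // p if n > 0 else n)
--
--     sd, lead = stats(day)
--     first_sum = sd + stats(month)[0] + stats(year)[0]
--     second_sum = stats(first_sum)[0] if first_sum > 9 else first_sum
--     third_sum = first_sum - 2 * lead
--     fourth_sum = stats(third_sum)[0]
--     return [day, month, year, first_sum, second_sum, third_sum, fourth_sum]
-- ===== Notes on version B (the rewrite author's own statement) =====
-- stated objective: alternative
-- what changed: B never extracts digits at all: it uses the truncation identity digit_sum(n) = n - 9*sum(n//10**k for k>=1), accumulated by one power-of-ten loop per component whose final power of ten also yields the day's leading digit as n//p, instead of A's string formatting and per-character int() summation.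
import Mathlib
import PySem

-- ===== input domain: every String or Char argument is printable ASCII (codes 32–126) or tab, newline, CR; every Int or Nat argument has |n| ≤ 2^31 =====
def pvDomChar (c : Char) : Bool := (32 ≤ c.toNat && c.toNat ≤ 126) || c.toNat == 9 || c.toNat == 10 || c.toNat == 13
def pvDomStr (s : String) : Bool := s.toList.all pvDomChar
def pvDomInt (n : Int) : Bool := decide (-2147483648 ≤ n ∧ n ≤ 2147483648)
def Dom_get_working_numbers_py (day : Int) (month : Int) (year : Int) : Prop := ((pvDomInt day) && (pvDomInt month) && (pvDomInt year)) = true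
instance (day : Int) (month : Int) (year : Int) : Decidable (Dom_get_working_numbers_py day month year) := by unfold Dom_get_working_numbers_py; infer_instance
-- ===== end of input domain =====

-- B replaces A's per-digit string summation by the truncation identity
-- digit_sum(n) = n - 9*Σ_{k≥1} ⌊n/10^k⌋, one power-of-ten loop per component that
-- also yields the leading digit; return values agree on Pre_ (where A raises no ValueError).

-- ===== PORT A =====
-- int(d) for a single character d; exact on digit characters (the only ones reached
-- inside Pre_: elsewhere Python's int() raises ValueError and the input is excluded).
def pyIntOfChar (c : Char) : Int := (PySem.Int.ofChars? [c]).getD 0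

-- f"{n:02d}": zero-pad to width 2 (any negative rendering already has length ≥ 2).
def pad02 (n : Int) : List Char :=
  let s := PySem.Int.toChars n
  if s.length < 2 then '0' :: s else s

def get_working_numbers_py (day : Int) (month : Int) (year : Int) : List Int :=
  let dob : List Char := pad02 day ++ pad02 month ++ PySem.Int.toChars year
  let first_sum : Int := (dob.map pyIntOfChar).sum
  let second_sum : Int :=
    if first_sum > 9 then ((PySem.Int.toChars first_sum).map pyIntOfChar).sum
    else first_sum
  -- str(day)[0]: str(day) is never empty, so headD is exact
  let third_sum : Int :=
    if day ≥ 10 then first_sum - 2 * pyIntOfChar ((PySem.Int.toChars day).headD '0')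
    else first_sum - 2 * day
  let fourth_sum : Int := ((PySem.Int.toChars third_sum).map pyIntOfChar).sum
  [day, month, year, first_sum, second_sum, third_sum, fourth_sum]

-- ===== PORT B =====
-- the `while p * 10 <= n: p *= 10; t += n // p` loop of B's stats helper.
-- The `0 < p` conjunct only makes the recursion total (Python would loop forever
-- there); the loop is only ever entered with p = 1 and p stays positive.
def pvStatsLoop (n t p : Int) : Int × Int :=
  if _h : p * 10 ≤ n ∧ 0 < p then
    pvStatsLoop n (t + PySem.Int.floordiv n (p * 10)) (p * 10)
  else (t, p)
termination_by (n - p).toNat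
decreasing_by omega

-- stats(n) = (n - 9*t, n//p if n > 0 else n)
def pvStats (n : Int) : Int × Int :=
  let r := pvStatsLoop n 0 1
  (n - 9 * r.1, if n > 0 then PySem.Int.floordiv n r.2 else n)

def get_working_numbers_py_alt (day : Int) (month : Int) (year : Int) : List Int :=
  let sd := pvStats day
  let first_sum : Int := sd.1 + (pvStats month).1 + (pvStats year).1
  let second_sum : Int := if first_sum > 9 then (pvStats first_sum).1 else first_sum
  let third_sum : Int := first_sum - 2 * sd.2
  let fourth_sum : Int := (pvStats third_sum).1
  [day, month, year, first_sum, second_sum, third_sum, fourth_sum]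

-- ===== PRECONDITION & SPEC =====
-- fuel-based digit sum and leading digit (structural, so the kernel can evaluate them;
-- exact whenever n ≤ fuel, and Pre_ uses fuel = n itself)
def pvSumDigF : Nat → Nat → Nat
  | 0, _ => 0
  | f + 1, n => if n = 0 then 0 else n % 10 + pvSumDigF f (n / 10)

def pvLeadF : Nat → Nat → Nat
  | 0, n => n
  | f + 1, n => if n < 10 then n else pvLeadF f (n / 10)

-- Pre_ excludes exactly the inputs on which A raises ValueError: a negative component
-- (a '-' reaches int()) or a negative third working number (int() over str(third_sum)).
def Pre_get_working_numbers_py (day : Int) (month : Int) (year : Int) : Prop :=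
  0 ≤ day ∧ 0 ≤ month ∧ 0 ≤ year ∧
  2 * ((pvLeadF day.toNat day.toNat : Nat) : Int) ≤
    ((pvSumDigF day.toNat day.toNat + pvSumDigF month.toNat month.toNat
      + pvSumDigF year.toNat year.toNat : Nat) : Int)
instance (day : Int) (month : Int) (year : Int) : Decidable (Pre_get_working_numbers_py day month year) := by unfold Pre_get_working_numbers_py; infer_instance

def pvWitness_get_working_numbers_py : Int × Int × Int := (1, 2, 2000)

def Spec_get_working_numbers_py (day : Int) (month : Int) (year : Int) (out : List Int) : Prop := out = get_working_numbers_py_alt day month year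
instance (day : Int) (month : Int) (year : Int) (out : List Int) : Decidable (Spec_get_working_numbers_py day month year out) := by unfold Spec_get_working_numbers_py; infer_instance

-- ===== CLAIM (what is proved, stated in full; the proofs are below) =====
def Claim_equal_get_working_numbers_py : Prop := ∀ (day : Int) (month : Int) (year : Int), Dom_get_working_numbers_py day month year → Pre_get_working_numbers_py day month year → Spec_get_working_numbers_py day month year (get_working_numbers_py day month year)

-- ===== LEMMAS AND PROOFS =====

-- proof-side Nat models: plain digit sum, leading digit, and the truncation sum Σ_{k≥1} n/10^k
def pvDigitSumN (n : Nat) : Int :=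
  if _h : n = 0 then 0
  else ((n % 10 : Nat) : Int) + pvDigitSumN (n / 10)
termination_by n
decreasing_by exact Nat.div_lt_self (by omega) (by norm_num)

def pvLeadN (n : Nat) : Nat :=
  if n ≥ 10 then pvLeadN (n / 10) else n
termination_by n
decreasing_by exact Nat.div_lt_self (by omega) (by norm_num)

def pvTruncSumN (n : Nat) : Nat :=
  if _h : n = 0 then 0 else n / 10 + pvTruncSumN (n / 10)
termination_by n
decreasing_by exact Nat.div_lt_self (by omega) (by norm_num)

lemma pyIntOfChar_digitChar {d : Nat} (h : d < 10) :
    pyIntOfChar (Nat.digitChar d) = (d : Int) := by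
  interval_cases d <;> decide

lemma pvDigitSumN_zero : pvDigitSumN 0 = 0 := by
  rw [pvDigitSumN]; simp

lemma pvDigitSumN_pos {n : Nat} (h : n ≠ 0) :
    pvDigitSumN n = ((n % 10 : Nat) : Int) + pvDigitSumN (n / 10) := by
  conv_lhs => rw [pvDigitSumN]
  rw [dif_neg h]

lemma sum_toDigitsCore : ∀ (f n : Nat) (acc : List Char), n < f →
    ((Nat.toDigitsCore 10 f n acc).map pyIntOfChar).sum
      = pvDigitSumN n + ((acc.map pyIntOfChar).sum) := by
  intro f
  induction f with
  | zero => intro n acc h; omega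
  | succ f ih =>
    intro n acc h
    rw [Nat.toDigitsCore]
    by_cases h0 : n / 10 = 0
    · simp only [h0, if_true, List.map_cons, List.sum_cons]
      rw [pyIntOfChar_digitChar (Nat.mod_lt _ (by norm_num))]
      by_cases hz : n = 0
      · subst hz; rw [pvDigitSumN_zero]; simp
      · rw [pvDigitSumN_pos hz, h0, pvDigitSumN_zero]; ring
    · rw [if_neg h0]
      have hnpos : 0 < n := by omega
      have : n / 10 < f := lt_of_lt_of_le (Nat.div_lt_self hnpos (by norm_num)) (by omega)
      rw [ih _ _ this]
      simp only [List.map_cons, List.sum_cons]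
      rw [pyIntOfChar_digitChar (Nat.mod_lt _ (by norm_num))]
      rw [pvDigitSumN_pos (by omega : n ≠ 0)]
      ring

lemma charSum_toChars {n : Int} (h : 0 ≤ n) :
    ((PySem.Int.toChars n).map pyIntOfChar).sum = pvDigitSumN n.toNat := by
  rw [PySem.Int.toChars, if_neg (by omega : ¬ n < 0), Nat.toDigits]
  rw [sum_toDigitsCore _ _ _ (Nat.lt_succ_self _)]
  simp

lemma charSum_pad02 {n : Int} (h : 0 ≤ n) :
    ((pad02 n).map pyIntOfChar).sum = pvDigitSumN n.toNat := by
  rw [pad02]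
  split
  · simp only [List.map_cons, List.sum_cons]
    rw [show pyIntOfChar '0' = 0 from rfl, charSum_toChars h, zero_add]
  · exact charSum_toChars h

lemma pvLeadN_lt {n : Nat} (h : n < 10) : pvLeadN n = n := by
  rw [pvLeadN, if_neg (by omega : ¬ n ≥ 10)]

lemma pvLeadN_ge {n : Nat} (h : 10 ≤ n) : pvLeadN n = pvLeadN (n / 10) := by
  conv_lhs => rw [pvLeadN]
  rw [if_pos h]

lemma head_toDigitsCore : ∀ (f n : Nat) (acc : List Char), n < f →
    (Nat.toDigitsCore 10 f n acc).headD '0' = Nat.digitChar (pvLeadN n) := by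
  intro f
  induction f with
  | zero => intro n acc h; omega
  | succ f ih =>
    intro n acc h
    rw [Nat.toDigitsCore]
    by_cases h0 : n / 10 = 0
    · rw [if_pos h0, pvLeadN_lt (by omega), List.headD_cons,
        Nat.mod_eq_of_lt (by omega)]
    · rw [if_neg h0]
      have hnpos : 0 < n := by omega
      have hlt : n / 10 < f := lt_of_lt_of_le (Nat.div_lt_self hnpos (by norm_num)) (by omega)
      rw [ih _ _ hlt, pvLeadN_ge (by omega : 10 ≤ n)]

lemma pvLeadN_lt_ten : ∀ n : Nat, pvLeadN n < 10 := by
  intro n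
  induction n using Nat.strong_induction_on with
  | _ n ih =>
    rw [pvLeadN]
    split
    · exact ih _ (Nat.div_lt_self (by omega) (by norm_num))
    · omega

lemma pvSumDigF_eq : ∀ (f n : Nat), n ≤ f → ((pvSumDigF f n : Nat) : Int) = pvDigitSumN n := by
  intro f
  induction f with
  | zero => intro n h; rw [show n = 0 by omega, pvSumDigF, pvDigitSumN_zero]; rfl
  | succ f ih =>
    intro n h
    rw [pvSumDigF]
    by_cases h0 : n = 0
    · rw [if_pos h0, h0, pvDigitSumN_zero]; rfl
    · rw [if_neg h0, pvDigitSumN_pos h0,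
        ← ih (n / 10) (by omega)]
      push_cast
      ring

lemma pvLeadF_eq : ∀ (f n : Nat), n ≤ f → pvLeadF f n = pvLeadN n := by
  intro f
  induction f with
  | zero => intro n h; rw [show n = 0 by omega, pvLeadF, pvLeadN_lt (by norm_num)]
  | succ f ih =>
    intro n h
    rw [pvLeadF]
    by_cases h10 : n < 10
    · rw [if_pos h10, pvLeadN_lt h10]
    · rw [if_neg h10, ih (n / 10) (by omega)]
      exact (pvLeadN_ge (by omega : 10 ≤ n)).symm

lemma pvDigitSumN_eq_digits_sum : ∀ n : Nat, pvDigitSumN n = ((Nat.digits 10 n).sum : Int) := by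
  intro n
  induction n using Nat.strong_induction_on with
  | _ n ih =>
    rw [pvDigitSumN]
    split
    · rename_i h; subst h; simp
    · rename_i h
      rw [ih _ (Nat.div_lt_self (Nat.pos_of_ne_zero h) (by norm_num))]
      rw [Nat.digits_def' (by norm_num : 1 < 10) (Nat.pos_of_ne_zero h)]
      push_cast
      simp only [List.map_cons, List.sum_cons]
      omega

lemma pvDigitSumN_nonneg (n : Nat) : 0 ≤ pvDigitSumN n := by
  rw [pvDigitSumN_eq_digits_sum]; positivity

-- B-side: the truncation identity  n - 9 * Σ_{k≥1} n/10^k = digit sum of n.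
lemma trunc_identity : ∀ n : Nat, (n : Int) - 9 * (pvTruncSumN n : Int) = pvDigitSumN n := by
  intro n
  induction n using Nat.strong_induction_on with
  | _ n ih =>
    rw [pvTruncSumN]
    by_cases h : n = 0
    · subst h; rw [pvDigitSumN_zero]; simp
    · rw [dif_neg h, pvDigitSumN_pos h,
        ← ih _ (Nat.div_lt_self (Nat.pos_of_ne_zero h) (by norm_num))]
      push_cast
      omega

lemma pvTruncSumN_lt {n : Nat} (h : n < 10) : pvTruncSumN n = 0 := by
  rw [pvTruncSumN]
  by_cases h0 : n = 0
  · rw [dif_pos h0]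
  · rw [dif_neg h0, Nat.div_eq_of_lt h, pvTruncSumN]; simp

-- the loop's full specification: first component accumulates the truncation sum of
-- n/p, the final p divides n to the leading digit of n/p.
lemma pvStatsLoop_spec : ∀ (m : Nat) (n t p : Int), 0 ≤ n → 0 < p → n / p = (m : Int) →
    (pvStatsLoop n t p).1 = t + (pvTruncSumN m : Int) ∧
    0 < (pvStatsLoop n t p).2 ∧
    n / (pvStatsLoop n t p).2 = ((pvLeadN m : Nat) : Int) := by
  intro m
  induction m using Nat.strong_induction_on with
  | _ m ih =>
    intro n t p hn hp hm
    rw [pvStatsLoop]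
    by_cases hc : p * 10 ≤ n
    · have h10 : (10 : Int) ≤ n / p := by
        rw [Int.le_ediv_iff_mul_le hp]; linarith
      have hm10 : 10 ≤ m := by
        rw [hm] at h10; exact_mod_cast h10
      have hdiv : n / (p * 10) = ((m / 10 : Nat) : Int) := by
        rw [← Int.ediv_ediv_of_nonneg (by omega : (0:Int) ≤ p), hm]
        omega
      have hlt : m / 10 < m := Nat.div_lt_self (by omega) (by norm_num)
      obtain ⟨h1, h2, h3⟩ := ih _ hlt n (t + PySem.Int.floordiv n (p * 10)) (p * 10)
        hn (by positivity) hdiv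
      rw [dif_pos ⟨hc, hp⟩]
      refine ⟨?_, h2, ?_⟩
      · rw [h1, PySem.Int.floordiv_eq_ediv_of_pos (by positivity), hdiv]
        conv_rhs => rw [pvTruncSumN]
        rw [dif_neg (by omega : m ≠ 0)]
        push_cast
        ring
      · rw [h3, pvLeadN_ge hm10]
    · rw [dif_neg (by tauto)]
      have hmlt : m < 10 := by
        by_contra hge
        have h10 : (10 : Int) ≤ n / p := by
          rw [hm]; exact_mod_cast (by omega : 10 ≤ m)
        rw [Int.le_ediv_iff_mul_le hp] at h10
        linarith
      refine ⟨by rw [pvTruncSumN_lt hmlt]; simp, hp, ?_⟩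
      rw [pvLeadN_lt hmlt]; exact hm

lemma pvStats_fst {n : Int} (h : 0 ≤ n) : (pvStats n).1 = pvDigitSumN n.toNat := by
  have hm : n / 1 = ((n.toNat : Nat) : Int) := by omega
  obtain ⟨h1, -, -⟩ := pvStatsLoop_spec n.toNat n 0 1 h one_pos hm
  rw [pvStats]
  simp only
  rw [h1, zero_add, ← trunc_identity n.toNat]
  omega

lemma pvStats_snd {n : Int} (h : 0 ≤ n) : (pvStats n).2 = ((pvLeadN n.toNat : Nat) : Int) := by
  have hm : n / 1 = ((n.toNat : Nat) : Int) := by omega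
  obtain ⟨-, h2, h3⟩ := pvStatsLoop_spec n.toNat n 0 1 h one_pos hm
  rw [pvStats]
  simp only
  by_cases hpos : n > 0
  · rw [if_pos hpos, PySem.Int.floordiv_eq_ediv_of_pos h2, h3]
  · have hz : n = 0 := by omega
    rw [if_neg hpos, hz]
    rw [show (0:Int).toNat = 0 from rfl, pvLeadN_lt (by norm_num)]
    rfl

-- ===== VERDICT (by name: the statement is the Claim_ definition above) =====
theorem get_working_numbers_py_spec : Claim_equal_get_working_numbers_py := by
  intro day month year _ hpre
  obtain ⟨hd, hm, hy, hlead⟩ := hpre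
  unfold Spec_get_working_numbers_py get_working_numbers_py get_working_numbers_py_alt
  simp only [List.map_append, List.sum_append]
  rw [charSum_pad02 hd, charSum_pad02 hm, charSum_toChars hy,
    pvStats_fst hd, pvStats_fst hm, pvStats_fst hy, pvStats_snd hd]
  set F : Int := pvDigitSumN day.toNat + pvDigitSumN month.toNat + pvDigitSumN year.toNat with hF
  have hleadA : (if day ≥ 10 then F - 2 * pyIntOfChar ((PySem.Int.toChars day).headD '0')
      else F - 2 * day) = F - 2 * ((pvLeadN day.toNat : Nat) : Int) := by
    split
    · rename_i h10
      rw [PySem.Int.toChars, if_neg (by omega : ¬ day < 0), Nat.toDigits]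
      rw [head_toDigitsCore _ _ _ (Nat.lt_succ_self _)]
      rw [pyIntOfChar_digitChar (pvLeadN_lt_ten _)]
    · rename_i h10
      rw [pvLeadN_lt (by omega), Int.toNat_of_nonneg hd]
  rw [hleadA]
  have hthird : 0 ≤ F - 2 * ((pvLeadN day.toNat : Nat) : Int) := by
    rw [pvLeadF_eq _ _ le_rfl] at hlead
    have hs : ((pvSumDigF day.toNat day.toNat + pvSumDigF month.toNat month.toNat
        + pvSumDigF year.toNat year.toNat : Nat) : Int) = F := by
      rw [hF, ← pvSumDigF_eq day.toNat day.toNat le_rfl,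
        ← pvSumDigF_eq month.toNat month.toNat le_rfl,
        ← pvSumDigF_eq year.toNat year.toNat le_rfl]
      push_cast
      ring
    rw [hs] at hlead
    omega
  have hFpos : 0 ≤ F := by
    have := pvDigitSumN_nonneg day.toNat
    have := pvDigitSumN_nonneg month.toNat
    have := pvDigitSumN_nonneg year.toNat
    omega
  rw [pvStats_fst hthird, charSum_toChars hthird]
  by_cases h9 : F > 9
  · rw [if_pos h9, if_pos h9, charSum_toChars (by omega), pvStats_fst (by omega)]
  · rw [if_neg h9, if_neg h9]
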